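-- pv_equiv track=rewrite | github.com/BPMSoftwareSolutions/renderx-plugins-demo | packages/ographx/scripts/analyze_startup_performance.py | analyze_call_chains
-- ===== SOURCE A (Python) =====
-- from collections import defaultdict
--
-- def analyze_call_chains(graph_data, startup_functions):
--     """Analyze call chains from startup functions"""
--     call_chains = defaultdict(list)
--
--     if not graph_data or 'calls' not in graph_data:
--         return call_chains
--
--     # Build reverse index for quick lookup
--     calls_by_caller = defaultdict(list)
--     for call in graph_data.get('calls', []):
--         caller = call.get('caller', '')
--         callee = call.get('callee', '')
--         calls_by_caller[caller].append(callee)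
--
--     # Trace call chains from startup functions
--     def trace_chain(func, depth=0, visited=None):
--         if visited is None:
--             visited = set()
--         if func in visited or depth > 5:
--             return []
--
--         visited.add(func)
--         chain = [func]
--
--         for callee in calls_by_caller.get(func, [])[:3]:  # Limit to top 3
--             chain.extend(trace_chain(callee, depth + 1, visited))
--
--         return chain
--
--     for func in startup_functions:
--         call_chains[func] = trace_chain(func)
--
--     return call_chains
-- ===== SOURCE B (Python) =====
-- from collections import defaultdict
--
-- def analyze_call_chains(graph_data, startup_functions):
--     """Analyze call chains from startup functions (iterative, explicit stack)."""
--     call_chains = defaultdict(list)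
--
--     if not graph_data or 'calls' not in graph_data:
--         return call_chains
--
--     calls_by_caller = defaultdict(list)
--     for call in graph_data.get('calls', []):
--         calls_by_caller[call.get('caller', '')].append(call.get('callee', ''))
--
--     for func in startup_functions:
--         chain = []
--         visited = set()
--         stack = [(func, 0)]
--         while stack:
--             f, depth = stack.pop()
--             if f in visited or depth > 5:
--                 continue
--             visited.add(f)
--             chain.append(f)
--             for callee in reversed(calls_by_caller.get(f, [])[:3]):
--                 stack.append((callee, depth + 1))
--         call_chains[func] = chain
--
--     return call_chains
-- ===== Notes on version B (the rewrite author's own statement) =====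
-- stated objective: alternative
-- what changed: The recursive trace_chain (call-stack recursion with a shared mutable visited set) is replaced by an explicit stack loop per startup function: pop (func, depth), skip if visited or depth > 5, otherwise record func and push its first three callees in reversed order at depth+1.
import Mathlib
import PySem

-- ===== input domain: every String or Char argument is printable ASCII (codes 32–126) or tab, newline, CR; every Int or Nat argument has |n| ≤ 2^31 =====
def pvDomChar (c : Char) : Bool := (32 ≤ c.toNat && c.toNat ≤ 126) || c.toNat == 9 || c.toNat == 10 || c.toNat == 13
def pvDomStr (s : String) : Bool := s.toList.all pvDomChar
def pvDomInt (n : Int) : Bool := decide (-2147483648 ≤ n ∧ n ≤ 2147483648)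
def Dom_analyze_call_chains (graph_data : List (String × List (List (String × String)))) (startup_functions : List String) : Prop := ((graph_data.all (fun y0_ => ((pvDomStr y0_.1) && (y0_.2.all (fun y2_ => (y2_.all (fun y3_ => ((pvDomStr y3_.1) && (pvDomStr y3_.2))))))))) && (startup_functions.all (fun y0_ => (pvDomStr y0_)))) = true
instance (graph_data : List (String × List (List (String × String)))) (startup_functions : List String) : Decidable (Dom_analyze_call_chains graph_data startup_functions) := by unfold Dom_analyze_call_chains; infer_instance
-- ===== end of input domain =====

-- B replaces A's recursive trace_chain by an explicit stack loop per startup function (same reverse index, same result); objective: alternative decomposition, not speed.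

-- ===== PORT A =====
-- reverse index: for call in calls: calls_by_caller[caller].append(callee)  (shared by both ports, as in B's Python)
def pvCallsByCaller (calls : List (List (String × String))) : PySem.Dict String (List String) :=
  calls.foldl
    (fun d call =>
      d.modify ((PySem.Dict.mk call).getD "caller" "") []
        (fun l => l ++ [((PySem.Dict.mk call).getD "callee" "")]))
    PySem.Dict.empty

-- trace_chain: recursion, the callee loop threaded with the mutated visited set
mutual
  def traceA (cbc : PySem.Dict String (List String)) (func : String) (depth : Nat)
      (visited : PySem.Set String) : List String × PySem.Set String :=
    if visited.contains func || depth > 5 then ([], visited)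
    else
      let r := traceAList cbc ((cbc.getD func []).take 3) (depth + 1) (visited.add func)
      (func :: r.1, r.2)
  termination_by ((6 - depth : Nat), 0, 0)
  decreasing_by
    rename_i h
    simp at h
    refine Prod.Lex.left _ _ ?_
    omega

  def traceAList (cbc : PySem.Dict String (List String)) (callees : List String) (depth : Nat)
      (visited : PySem.Set String) : List String × PySem.Set String :=
    match callees with
    | [] => ([], visited)
    | c :: cs =>
      let r1 := traceA cbc c depth visited
      let r2 := traceAList cbc cs depth r1.2
      (r1.1 ++ r2.1, r2.2)
  termination_by ((6 - depth : Nat), 1, callees.length)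
  decreasing_by
    · exact Prod.Lex.right _ (Prod.Lex.left _ _ (by omega))
    · exact Prod.Lex.right _ (Prod.Lex.right _ (by simp))
end

def analyze_call_chains (graph_data : List (String × List (List (String × String)))) (startup_functions : List String) : List (String × List String) :=
  if graph_data.isEmpty || !((PySem.Dict.mk graph_data).contains "calls") then []
  else
    let cbc := pvCallsByCaller ((PySem.Dict.mk graph_data).getD "calls" [])
    (startup_functions.foldl
      (fun d func => d.insert func (traceA cbc func 0 PySem.Set.empty).1)
      PySem.Dict.empty).items

-- ===== PORT B =====
-- stack-weight lemmas cited by loopB's decreasing_by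
def pvWeight (p : String × Nat) : Nat := 4 ^ (6 - p.2)

theorem pvFoldlConsRev {α β : Type} (l : List α) (f : α → β) (rest : List β) :
    l.reverse.foldl (fun st c => f c :: st) rest = l.map f ++ rest := by
  induction l generalizing rest with
  | nil => rfl
  | cons a as ih => simp [List.foldl_append, ih]

theorem pvPushMeasure (cs : List String) (d : Nat) (rest : List (String × Nat))
    (hd : d ≤ 5) (hlen : cs.length ≤ 3) :
    ((cs.reverse.foldl (fun st c => (c, d + 1) :: st) rest).map pvWeight).sum
      < pvWeight (⟨"", d⟩ : String × Nat) + (rest.map pvWeight).sum := by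
  rw [pvFoldlConsRev]
  simp only [List.map_append, List.sum_append]
  have h1 : ∀ (l : List String),
      ((l.map (fun c => (c, d + 1))).map pvWeight).sum = l.length * 4 ^ (5 - d) := by
    intro l
    induction l with
    | nil => simp
    | cons a as ih =>
      simp only [List.map_cons, List.sum_cons, List.length_cons, ih]
      have : pvWeight (a, d + 1) = 4 ^ (5 - d) := by
        unfold pvWeight; simp only []; congr 1; omega
      rw [this]; ring
  rw [h1]
  have h2 : pvWeight (⟨"", d⟩ : String × Nat) = 4 * 4 ^ (5 - d) := by
    unfold pvWeight; simp only []
    rw [show 6 - d = (5 - d) + 1 by omega]; ring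
  have h3 : (1 : Nat) ≤ 4 ^ (5 - d) := Nat.one_le_pow _ _ (by norm_num)
  have h4 : cs.length * 4 ^ (5 - d) ≤ 3 * 4 ^ (5 - d) := Nat.mul_le_mul_right _ hlen
  omega

theorem pvWeight_pos (p : String × Nat) : 1 ≤ pvWeight p :=
  Nat.one_le_pow _ _ (by norm_num)

def loopB (cbc : PySem.Dict String (List String)) :
    List (String × Nat) → PySem.Set String → List String → List String
  | [], _, chain => chain
  | (f, d) :: rest, visited, chain =>
    if visited.contains f || d > 5 then loopB cbc rest visited chain
    else
      loopB cbc
        (((cbc.getD f []).take 3).reverse.foldl (fun st c => (c, d + 1) :: st) rest)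
        (visited.add f) (chain ++ [f])
termination_by stack _ _ => (stack.map pvWeight).sum
decreasing_by
  · simp only [List.map_cons, List.sum_cons]
    have := pvWeight_pos (f, d)
    omega
  · rename_i h
    simp at h
    simp only [List.map_cons, List.sum_cons]
    have hw : pvWeight (f, d) = pvWeight (⟨"", d⟩ : String × Nat) := rfl
    rw [hw]
    exact pvPushMeasure _ d rest h.2 (List.length_take_le _ _)

def analyze_call_chains_alt (graph_data : List (String × List (List (String × String)))) (startup_functions : List String) : List (String × List String) :=
  if graph_data.isEmpty || !((PySem.Dict.mk graph_data).contains "calls") then []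
  else
    let cbc := pvCallsByCaller ((PySem.Dict.mk graph_data).getD "calls" [])
    (startup_functions.foldl
      (fun d func => d.insert func (loopB cbc [(func, 0)] PySem.Set.empty []))
      PySem.Dict.empty).items

-- ===== PRECONDITION & SPEC =====
def Spec_analyze_call_chains (graph_data : List (String × List (List (String × String)))) (startup_functions : List String) (out : List (String × List String)) : Prop := out = analyze_call_chains_alt graph_data startup_functions
instance (graph_data : List (String × List (List (String × String)))) (startup_functions : List String) (out : List (String × List String)) : Decidable (Spec_analyze_call_chains graph_data startup_functions out) := by unfold Spec_analyze_call_chains; infer_instance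

-- ===== CLAIM (what is proved, stated in full; the proofs are below) =====
def Claim_equal_analyze_call_chains : Prop := ∀ (graph_data : List (String × List (List (String × String)))) (startup_functions : List String), Dom_analyze_call_chains graph_data startup_functions → Spec_analyze_call_chains graph_data startup_functions (analyze_call_chains graph_data startup_functions)

-- ===== LEMMAS AND PROOFS =====
theorem pvLoopB_nil (cbc : PySem.Dict String (List String)) (v : PySem.Set String) (ch : List String) :
    loopB cbc [] v ch = ch := by rw [loopB]

theorem pvLoopB_cons (cbc : PySem.Dict String (List String)) (f : String) (d : Nat)
    (rest : List (String × Nat)) (v : PySem.Set String) (ch : List String) :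
    loopB cbc ((f, d) :: rest) v ch =
      if v.contains f || d > 5 then loopB cbc rest v ch
      else loopB cbc (((cbc.getD f []).take 3).reverse.foldl (fun st c => (c, d + 1) :: st) rest)
             (v.add f) (ch ++ [f]) := by rw [loopB]

-- bridge: one pop of the stack performs exactly one recursive trace step
theorem pvBridge (cbc : PySem.Dict String (List String)) :
    ∀ n d, 6 - d ≤ n →
      (∀ f visited rest chain,
        loopB cbc ((f, d) :: rest) visited chain
          = loopB cbc rest (traceA cbc f d visited).2 (chain ++ (traceA cbc f d visited).1)) ∧
      (∀ cs visited rest chain,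
        loopB cbc (cs.map (fun c => (c, d)) ++ rest) visited chain
          = loopB cbc rest (traceAList cbc cs d visited).2
              (chain ++ (traceAList cbc cs d visited).1)) := by
  intro n
  induction n with
  | zero =>
    intro d hd
    have hd6 : (visited : PySem.Set String) → ∀ f, (visited.contains f || d > 5) = true := by
      intro visited f
      have : d > 5 := by omega
      simp [this]
    have hA : ∀ f visited rest chain,
        loopB cbc ((f, d) :: rest) visited chain
          = loopB cbc rest (traceA cbc f d visited).2 (chain ++ (traceA cbc f d visited).1) := by
      intro f visited rest chain
      rw [pvLoopB_cons, if_pos (hd6 visited f)]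
      unfold traceA
      rw [if_pos (hd6 visited f)]
      simp
    refine ⟨hA, ?_⟩
    intro cs
    induction cs with
    | nil =>
      intro visited rest chain
      unfold traceAList
      simp
    | cons c cs ih =>
      intro visited rest chain
      unfold traceAList
      simp only [List.map_cons, List.cons_append]
      rw [hA, ih]
      simp [List.append_assoc]
  | succ n ihn =>
    intro d hd
    have hA : ∀ f visited rest chain,
        loopB cbc ((f, d) :: rest) visited chain
          = loopB cbc rest (traceA cbc f d visited).2 (chain ++ (traceA cbc f d visited).1) := by
      intro f visited rest chain
      by_cases hc : (visited.contains f || d > 5) = true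
      · rw [pvLoopB_cons, if_pos hc]
        unfold traceA
        rw [if_pos hc]
        simp
      · have hd5 : d ≤ 5 := by
          rcases Nat.lt_or_ge 5 d with h' | h'
          · exact absurd (by simp [h']) hc
          · exact h'
        rw [pvLoopB_cons, if_neg hc]
        unfold traceA
        rw [if_neg hc]
        rw [pvFoldlConsRev]
        rw [(ihn (d + 1) (by omega)).2]
        simp [List.append_assoc]
    refine ⟨hA, ?_⟩
    intro cs
    induction cs with
    | nil =>
      intro visited rest chain
      unfold traceAList
      simp
    | cons c cs ih =>
      intro visited rest chain
      unfold traceAList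
      simp only [List.map_cons, List.cons_append]
      rw [hA, ih]
      simp [List.append_assoc]

theorem pvLoopB_single (cbc : PySem.Dict String (List String)) (f : String) :
    loopB cbc [(f, 0)] PySem.Set.empty [] = (traceA cbc f 0 PySem.Set.empty).1 := by
  have h := ((pvBridge cbc 6 0 (by omega)).1) f PySem.Set.empty [] []
  rw [h, pvLoopB_nil]
  simp

theorem pvFoldEq (cbc : PySem.Dict String (List String)) (sf : List String)
    (d0 : PySem.Dict String (List String)) :
    sf.foldl (fun d func => d.insert func (loopB cbc [(func, 0)] PySem.Set.empty [])) d0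
      = sf.foldl (fun d func => d.insert func (traceA cbc func 0 PySem.Set.empty).1) d0 := by
  induction sf generalizing d0 with
  | nil => rfl
  | cons a as ih => rw [List.foldl_cons, List.foldl_cons, pvLoopB_single, ih]

-- ===== VERDICT (by name: the statement is the Claim_ definition above) =====
theorem analyze_call_chains_spec : Claim_equal_analyze_call_chains := by
  intro gd sf _
  unfold Spec_analyze_call_chains analyze_call_chains analyze_call_chains_alt
  split
  · rfl
  · simp only [pvFoldEq]
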